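-- pv_equiv track=rewrite | github.com/satojkovic/algorithms | python/graphs.py | dfs_r_paths
-- ===== SOURCE A (Python) =====
-- def dfs_r_paths(g, root, target, visited=None, path=None):
--     if visited is None:
--         visited = set()
--     if path is None:
--         path = []
--
--     paths = []
--     if root == target:
--         paths.append(path + [root])
--         return paths
--     path = path + [root]
--     visited = visited | {root}
--     for adj in g[root]:
--         if not adj in visited:
--             ps = dfs_r_paths(g, adj, target, visited, path)
--             for p in ps:
--                 paths.append(p)
--     return paths
-- ===== SOURCE B (Python) =====
-- def dfs_r_paths(g, root, target, visited=None, path=None):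
--     # Iterative DFS with an explicit LIFO stack instead of recursion.
--     if visited is None:
--         visited = set()
--     if path is None:
--         path = []
--     results = []
--     stack = [(root, path, visited)]
--     while stack:
--         node, node_path, node_visited = stack.pop()
--         if node == target:
--             results.append(node_path + [node])
--             continue
--         adjs = g[node]
--         new_path = node_path + [node]
--         new_visited = node_visited | {node}
--         for adj in reversed(adjs):
--             if adj not in new_visited:
--                 stack.append((adj, new_path, new_visited))
--     return results
-- ===== Notes on version B (the rewrite author's own statement) =====
-- stated objective: alternative
-- what changed: Replaces A's recursion (paths collected by recursive calls inside a for-loop) with an explicit LIFO stack of (node, path, visited) frames, pushing unvisited neighbours in reversed order so completed paths are emitted in the same order.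
import Mathlib
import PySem

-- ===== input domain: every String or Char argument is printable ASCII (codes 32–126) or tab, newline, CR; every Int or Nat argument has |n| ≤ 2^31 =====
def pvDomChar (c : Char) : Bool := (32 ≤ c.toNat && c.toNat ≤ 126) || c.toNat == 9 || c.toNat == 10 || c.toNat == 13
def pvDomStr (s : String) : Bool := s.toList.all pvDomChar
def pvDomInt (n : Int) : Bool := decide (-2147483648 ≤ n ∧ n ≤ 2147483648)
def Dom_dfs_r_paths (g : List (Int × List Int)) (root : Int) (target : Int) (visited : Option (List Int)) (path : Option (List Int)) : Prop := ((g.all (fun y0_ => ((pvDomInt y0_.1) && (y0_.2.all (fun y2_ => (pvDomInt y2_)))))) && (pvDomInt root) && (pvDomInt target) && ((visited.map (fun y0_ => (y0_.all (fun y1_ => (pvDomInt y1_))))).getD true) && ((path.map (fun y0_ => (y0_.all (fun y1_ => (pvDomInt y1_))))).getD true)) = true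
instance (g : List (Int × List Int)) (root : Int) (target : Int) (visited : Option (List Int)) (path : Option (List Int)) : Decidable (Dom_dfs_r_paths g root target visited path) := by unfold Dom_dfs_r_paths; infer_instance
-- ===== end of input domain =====

-- B replaces A's recursion by an explicit LIFO stack of (node, path, visited) frames (neighbours pushed
-- in reversed order), producing the identical path list; objective: alternative decomposition, not speed.

-- ===== PORT A =====
-- Termination bookkeeping (not part of the algorithm): number of graph keys not yet visited.
def pvKeysLeft (g : List (Int × List Int)) (vis : List Int) : Nat :=
  ((g.map Prod.fst).filter (fun k => !(vis.contains k))).length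

def pvMu (g : List (Int × List Int)) (node : Int) (vis : List Int) : Nat :=
  pvKeysLeft g vis + (if vis.contains node then 1 else 0)

lemma pv_filter_and_ne_length_lt {l : List Int} {p : Int → Bool} {a : Int}
    (ha : a ∈ l) (hpa : p a = true) :
    (l.filter (fun x => p x && !(x == a))).length < (l.filter p).length := by
  induction l with
  | nil => cases ha
  | cons b tl ih =>
    simp only [List.filter_cons]
    by_cases hb : b = a
    · subst hb
      have hbeq : (b == b) = true := beq_self_eq_true b
      simp only [hpa, hbeq, Bool.not_true, Bool.and_false, if_true]
      have hle : (tl.filter (fun x => p x && !(x == b))).length ≤ (tl.filter p).length :=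
        (List.monotone_filter_right tl
          (fun x hx => by simp only [Bool.and_eq_true] at hx; exact hx.1)).length_le
      simp only [Bool.false_eq_true, if_false, List.length_cons]
      omega
    · have ha' : a ∈ tl := by
        rcases ha with _ | h
        · exact absurd rfl hb
        · assumption
      have hlt := ih ha'
      have hbeq : (b == a) = false := beq_eq_false_iff_ne.mpr hb
      simp only [hbeq, Bool.not_false, Bool.and_true]
      by_cases hpb : p b = true
      · simp only [hpb, if_true, List.length_cons]
        omega
      · simp only [Bool.not_eq_true] at hpb
        simp only [hpb, Bool.false_eq_true, if_false]
        omega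

lemma pvMu_add_lt (g : List (Int × List Int)) (node : Int) (vis : List Int) (adjs : List Int)
    (h : (PySem.Dict.mk g).get? node = some adjs) :
    pvKeysLeft g (PySem.Set.add vis node) < pvMu g node vis := by
  by_cases hc : vis.contains node = true
  · have hmemv : node ∈ vis := by simpa using hc
    have hadd : PySem.Set.add vis node = vis := by simp [PySem.Set.add, hmemv]
    unfold pvMu pvKeysLeft
    rw [hadd, hc]
    simp
  · have hcf : vis.contains node = false := by
      cases hv : vis.contains node
      · rfl
      · exact absurd hv hc
    have hnmem : node ∉ vis := by simpa using hcf
    have hadd : PySem.Set.add vis node = vis ++ [node] := by simp [PySem.Set.add, hnmem]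
    have hmem : node ∈ (PySem.Dict.mk g).keys := by
      by_contra hn
      rw [← PySem.Dict.get?_eq_none_iff_not_mem_keys] at hn
      rw [h] at hn; cases hn
    rw [PySem.Dict.keys_mk] at hmem
    have heq : (fun k => !((vis ++ [node]).contains k))
        = (fun k => (!(vis.contains k)) && !((k == node))) := by
      funext k
      by_cases hk : k = node
      · subst hk
        simp
      · have h1 : (k == node) = false := beq_eq_false_iff_ne.mpr hk
        have h2 : (vis ++ [node]).contains k = vis.contains k := by
          simp [hk]
        rw [h2, h1]
        simp
    have hkey := pv_filter_and_ne_length_lt (l := g.map Prod.fst)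
      (p := fun k => !(vis.contains k)) (a := node) hmem (by show (!vis.contains node) = true; rw [hcf]; rfl)
    unfold pvMu pvKeysLeft
    rw [hadd, heq, hcf]
    simpa using hkey

def pvC (g : List (Int × List Int)) : Nat := (g.map (fun p => p.2.length)).foldl max 0 + 2

lemma pv_adj_len_le (g : List (Int × List Int)) (node : Int) (adjs : List Int)
    (h : (PySem.Dict.mk g).get? node = some adjs) : adjs.length ≤ pvC g - 2 := by
  have hmemg : (node, adjs) ∈ g := by
    have := PySem.Dict.mem_items_of_get?_eq_some _ h
    simpa using this
  have hm : adjs.length ∈ g.map (fun p => p.2.length) :=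
    List.mem_map_of_mem hmemg
  have := (PySem.List.le_foldl_max (g.map (fun p => p.2.length)) 0).2 _ hm
  unfold pvC; omega

mutual
-- literal port of A's recursion: paths = []; if root == target return [path+[root]];
-- path = path+[root]; visited = visited | {root}; for adj in g[root]: if adj not in visited: append results
def dfsA (g : List (Int × List Int)) (node target : Int) (visited path : List Int) : List (List Int) :=
  if node = target then [path ++ [node]]
  else
    match h : (PySem.Dict.mk g).get? node with
    | none => []  -- Python raises KeyError here (g[node]); excluded by Pre_
    | some adjs => dfsAList g adjs target (PySem.Set.add visited node) (path ++ [node]) []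
  termination_by pvC g * pvMu g node visited
  decreasing_by
    have h1 := pvMu_add_lt g node visited adjs h
    have h3 : 2 ≤ pvC g := by unfold pvC; omega
    have h2 : adjs.length + 2 ≤ pvC g := by
      have := pv_adj_len_le g node adjs h
      omega
    have h4 : pvC g * (pvKeysLeft g (PySem.Set.add visited node) + 1) ≤ pvC g * pvMu g node visited :=
      Nat.mul_le_mul_left _ (by omega)
    have h5 : pvC g * (pvKeysLeft g (PySem.Set.add visited node) + 1)
        = pvC g * pvKeysLeft g (PySem.Set.add visited node) + pvC g := by ring
    rw [h5] at h4
    linarith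

-- A's inner 'for adj in g[root]' loop with its 'paths' accumulator
def dfsAList (g : List (Int × List Int)) (adjs : List Int) (target : Int) (visited path : List Int) (paths : List (List Int)) : List (List Int) :=
  match adjs with
  | [] => paths
  | adj :: rest =>
    if hvc : visited.contains adj then dfsAList g rest target visited path paths
    else dfsAList g rest target visited path (paths ++ dfsA g adj target visited path)
  termination_by pvC g * pvKeysLeft g visited + adjs.length + 1
  decreasing_by
    · simp only [List.length_cons]; linarith
    · have hmu : pvMu g adj visited = pvKeysLeft g visited := by
        have hcf : visited.contains adj = false := by
          cases hv : visited.contains adj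
          · rfl
          · exact absurd hv hvc
        unfold pvMu
        rw [hcf]
        simp
      rw [hmu]
      simp only [List.length_cons]
      linarith
    · simp only [List.length_cons]; linarith
end

def dfs_r_paths (g : List (Int × List Int)) (root : Int) (target : Int) (visited : Option (List Int)) (path : Option (List Int)) : List (List Int) :=
  dfsA g root target (visited.getD []) (path.getD [])

-- ===== PORT B =====
-- Python's 'for adj in reversed(adjs): if adj not in vis: stack.append(frame)' on an end-pop stack,
-- on a head-pop list representation (head = top of stack)
lemma pv_foldl_push {α β : Type} (l : List α) (c : α → Bool) (f : α → β) (rest : List β) :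
    l.reverse.foldl (fun st a => if c a then st else f a :: st) rest
      = ((l.filter (fun a => !(c a))).map f) ++ rest := by
  rw [List.foldl_reverse]
  induction l with
  | nil => rfl
  | cons a tl ih =>
    simp only [List.foldr_cons, ih, List.filter_cons]
    by_cases hc : c a = true
    · simp [hc]
    · simp only [Bool.not_eq_true] at hc
      simp [hc]

def pvStackMeasure (g : List (Int × List Int)) (stack : List (Int × List Int × List Int)) : Nat :=
  (stack.map (fun fr => pvC g ^ pvMu g fr.1 fr.2.2)).sum

lemma pvStackMeasure_cons (g : List (Int × List Int)) (fr : Int × List Int × List Int)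
    (rest : List (Int × List Int × List Int)) :
    pvStackMeasure g (fr :: rest) = pvC g ^ pvMu g fr.1 fr.2.2 + pvStackMeasure g rest := by
  simp [pvStackMeasure]

lemma pv_push_measure_lt (g : List (Int × List Int)) (node : Int) (npath nvis : List Int)
    (adjs : List Int) (rest : List (Int × List Int × List Int))
    (h : (PySem.Dict.mk g).get? node = some adjs) :
    pvStackMeasure g
        (((adjs.filter (fun a => !((PySem.Set.add nvis node).contains a))).map
          (fun a => (a, npath ++ [node], PySem.Set.add nvis node))) ++ rest)
      < pvStackMeasure g ((node, npath, nvis) :: rest) := by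
  have hC : 2 ≤ pvC g := by unfold pvC; omega
  have hlt : pvKeysLeft g (PySem.Set.add nvis node) < pvMu g node nvis :=
    pvMu_add_lt g node nvis adjs h
  have hlen := pv_adj_len_le g node adjs h
  rw [pvStackMeasure_cons]
  unfold pvStackMeasure
  rw [List.map_append, List.sum_append]
  have hball : ∀ x ∈ ((adjs.filter (fun a => !((PySem.Set.add nvis node).contains a))).map
      (fun a => (a, npath ++ [node], PySem.Set.add nvis node))).map
        (fun fr => pvC g ^ pvMu g fr.1 fr.2.2),
      x ≤ pvC g ^ pvKeysLeft g (PySem.Set.add nvis node) := by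
    intro x hx
    rw [List.map_map] at hx
    rcases List.mem_map.mp hx with ⟨a, hafil, rfl⟩
    have hcontains : (PySem.Set.add nvis node).contains a = false := by
      have := List.of_mem_filter hafil
      cases hv : (PySem.Set.add nvis node).contains a
      · rfl
      · rw [hv] at this; simp at this
    show pvC g ^ pvMu g a (PySem.Set.add nvis node) ≤ pvC g ^ pvKeysLeft g (PySem.Set.add nvis node)
    have hcontains' : List.contains (PySem.Set.add nvis node) a = false := hcontains
    unfold pvMu
    rw [hcontains']
    simp
  have hsum_le := List.sum_le_card_nsmul _ _ hball
  rw [List.length_map, List.length_map, smul_eq_mul] at hsum_le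
  have hk : (adjs.filter (fun a => !((PySem.Set.add nvis node).contains a))).length ≤ pvC g - 2 :=
    le_trans (List.length_filter_le _ _) hlen
  have hpe : 0 < pvC g ^ pvKeysLeft g (PySem.Set.add nvis node) := Nat.pow_pos (by omega)
  have h1 : (adjs.filter (fun a => !((PySem.Set.add nvis node).contains a))).length *
      pvC g ^ pvKeysLeft g (PySem.Set.add nvis node)
      < pvC g ^ (pvKeysLeft g (PySem.Set.add nvis node) + 1) := by
    calc (adjs.filter (fun a => !((PySem.Set.add nvis node).contains a))).length *
          pvC g ^ pvKeysLeft g (PySem.Set.add nvis node)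
        ≤ (pvC g - 2) * pvC g ^ pvKeysLeft g (PySem.Set.add nvis node) :=
          Nat.mul_le_mul_right _ hk
      _ < pvC g * pvC g ^ pvKeysLeft g (PySem.Set.add nvis node) :=
          (Nat.mul_lt_mul_right hpe).mpr (by omega)
      _ = pvC g ^ (pvKeysLeft g (PySem.Set.add nvis node) + 1) := by
          rw [pow_succ]; ring
  have h2 : pvC g ^ (pvKeysLeft g (PySem.Set.add nvis node) + 1) ≤ pvC g ^ pvMu g node nvis :=
    Nat.pow_le_pow_right (by omega) (by omega)
  linarith

lemma pv_push_measure_lt' (g : List (Int × List Int)) (node : Int) (npath nvis : List Int)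
    (adjs : List Int) (rest : List (Int × List Int × List Int))
    (h : (PySem.Dict.mk g).get? node = some adjs) :
    pvStackMeasure g
        (adjs.reverse.foldl
          (fun st a => if (PySem.Set.add nvis node).contains a then st
            else (a, npath ++ [node], PySem.Set.add nvis node) :: st) rest)
      < pvStackMeasure g ((node, npath, nvis) :: rest) := by
  rw [pv_foldl_push]
  exact pv_push_measure_lt g node npath nvis adjs rest h

-- B's while-stack loop: pop a frame; emit the path when node == target, otherwise push unvisited
-- neighbours (reversed, so the first neighbour is on top)
def pvStackLoop (g : List (Int × List Int)) (target : Int)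
    (stack : List (Int × List Int × List Int)) (results : List (List Int)) : List (List Int) :=
  match stack with
  | [] => results
  | (node, npath, nvis) :: rest =>
    if node = target then pvStackLoop g target rest (results ++ [npath ++ [node]])
    else
      match h : (PySem.Dict.mk g).get? node with
      | none => pvStackLoop g target rest results  -- Python raises KeyError here (g[node]); excluded by Pre_
      | some adjs =>
        pvStackLoop g target
          (adjs.reverse.foldl
            (fun st a => if (PySem.Set.add nvis node).contains a then st
              else (a, npath ++ [node], PySem.Set.add nvis node) :: st) rest)
          results
  termination_by pvStackMeasure g stack
  decreasing_by
    · rw [pvStackMeasure_cons]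
      have := Nat.pow_pos (n := pvMu g node nvis) (show 0 < pvC g by unfold pvC; omega)
      linarith
    · rw [pvStackMeasure_cons]
      have := Nat.pow_pos (n := pvMu g node nvis) (show 0 < pvC g by unfold pvC; omega)
      linarith
    · exact pv_push_measure_lt' g node npath nvis adjs rest h

def dfs_r_paths_alt (g : List (Int × List Int)) (root : Int) (target : Int) (visited : Option (List Int)) (path : Option (List Int)) : List (List Int) :=
  pvStackLoop g target [(root, path.getD [], visited.getD [])] []

-- ===== PRECONDITION & SPEC =====
-- One step of the reachability closure: add every neighbour of a known-key member of E
-- that is neither the target nor initially visited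
def pvReachStep (g : List (Int × List Int)) (visited0 : List Int) (target : Int) (E : List Int) : List Int :=
  E.foldl (fun acc u =>
    match (PySem.Dict.mk g).get? u with
    | none => acc
    | some adjs => adjs.foldl
        (fun acc2 a => if a = target || visited0.contains a then acc2 else PySem.Set.add acc2 a) acc) E

-- nodes whose adjacency list A will index: closure from root (unless root = target), following edges
-- through key nodes, never through the target or the initially visited set; g.length + 2 rounds reach
-- the fixpoint since every intermediate node of a shortest such path is a distinct key of g
def pvReach (g : List (Int × List Int)) (root : Int) (target : Int) (visited0 : List Int) : List Int :=
  (List.range (g.length + 2)).foldl (fun E _ => pvReachStep g visited0 target E)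
    (if root = target then [] else [root])

-- Pre_ excludes exactly the inputs on which A raises KeyError: some node A indexes is not a key of g
def Pre_dfs_r_paths (g : List (Int × List Int)) (root : Int) (target : Int) (visited : Option (List Int)) (path : Option (List Int)) : Prop :=
  (pvReach g root target (visited.getD [])).all (fun v => (PySem.Dict.mk g).contains v) = true
instance (g : List (Int × List Int)) (root : Int) (target : Int) (visited : Option (List Int)) (path : Option (List Int)) : Decidable (Pre_dfs_r_paths g root target visited path) := by unfold Pre_dfs_r_paths; infer_instance

def pvWitness_dfs_r_paths : (List (Int × List Int)) × Int × Int × Option (List Int) × Option (List Int) :=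
  ([(0, [1, 2]), (1, [2]), (2, [])], 0, 2, none, none)

def Spec_dfs_r_paths (g : List (Int × List Int)) (root : Int) (target : Int) (visited : Option (List Int)) (path : Option (List Int)) (out : List (List Int)) : Prop := out = dfs_r_paths_alt g root target visited path
instance (g : List (Int × List Int)) (root : Int) (target : Int) (visited : Option (List Int)) (path : Option (List Int)) (out : List (List Int)) : Decidable (Spec_dfs_r_paths g root target visited path out) := by unfold Spec_dfs_r_paths; infer_instance

-- ===== CLAIM (what is proved, stated in full; the proofs are below) =====
def Claim_equal_dfs_r_paths : Prop := ∀ (g : List (Int × List Int)) (root : Int) (target : Int) (visited : Option (List Int)) (path : Option (List Int)), Dom_dfs_r_paths g root target visited path → Pre_dfs_r_paths g root target visited path → Spec_dfs_r_paths g root target visited path (dfs_r_paths g root target visited path)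

-- ===== LEMMAS AND PROOFS =====
-- A's inner loop appends onto its 'paths' accumulator
lemma dfsAList_acc (g : List (Int × List Int)) (adjs : List Int) (target : Int)
    (visited path : List Int) :
    ∀ paths, dfsAList g adjs target visited path paths
      = paths ++ dfsAList g adjs target visited path [] := by
  induction adjs with
  | nil => intro paths; simp [dfsAList]
  | cons a tl ih =>
    intro paths
    rw [dfsAList, dfsAList]
    by_cases hc : visited.contains a = true
    · simp only [hc]
      exact ih paths
    · simp only [hc, Bool.false_eq_true]
      rw [ih (paths ++ dfsA g a target visited path), ih ([] ++ dfsA g a target visited path)]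
      simp

-- processing one stack frame produces exactly the recursive dfsA results for that frame
lemma pvLoop_frame (g : List (Int × List Int)) (target : Int) :
    ∀ (n : Nat) (node : Int) (vis path : List Int)
      (rest : List (Int × List Int × List Int)) (acc : List (List Int)),
      pvMu g node vis ≤ n →
      pvStackLoop g target ((node, path, vis) :: rest) acc
        = pvStackLoop g target rest (acc ++ dfsA g node target vis path) := by
  intro n
  induction n using Nat.strong_induction_on with
  | _ n ih =>
    intro node vis path rest acc hn
    by_cases ht : node = target
    · conv_lhs => rw [pvStackLoop]
      rw [dfsA]
      simp [ht]
    · conv_lhs => rw [pvStackLoop]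
      rw [dfsA]
      simp only [ht, if_false]
      cases hg : (PySem.Dict.mk g).get? node with
      | none => simp
      | some adjs =>
        simp only []
        rw [pv_foldl_push]
        have hlt : pvKeysLeft g (PySem.Set.add vis node) < pvMu g node vis :=
          pvMu_add_lt g node vis adjs hg
        have key : ∀ (l : List Int) (acc2 : List (List Int)),
            pvStackLoop g target
              (((l.filter (fun a => !((PySem.Set.add vis node).contains a))).map
                (fun a => (a, path ++ [node], PySem.Set.add vis node))) ++ rest) acc2
            = pvStackLoop g target rest
                (acc2 ++ dfsAList g l target (PySem.Set.add vis node) (path ++ [node]) []) := by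
          intro l
          induction l with
          | nil => intro acc2; simp [dfsAList]
          | cons a tl ihl =>
            intro acc2
            rw [dfsAList]
            by_cases hc : (PySem.Set.add vis node).contains a = true
            · have hnotc : (!((PySem.Set.add vis node).contains a)) = false := by rw [hc]; rfl
              rw [List.filter_cons, hnotc, if_neg Bool.false_ne_true,
                dif_pos (show List.contains (PySem.Set.add vis node) a = true from hc)]
              exact ihl acc2
            · have hcf : (PySem.Set.add vis node).contains a = false := by
                cases hv : (PySem.Set.add vis node).contains a
                · rfl
                · exact absurd hv hc
              have hnotc : (!((PySem.Set.add vis node).contains a)) = true := by rw [hcf]; rfl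
              rw [List.filter_cons, hnotc, if_pos rfl,
                dif_neg (show ¬(List.contains (PySem.Set.add vis node) a = true) from hc)]
              rw [List.map_cons, List.cons_append]
              have hmu : pvMu g a (PySem.Set.add vis node) < n := by
                have heq0 : pvMu g a (PySem.Set.add vis node)
                    = pvKeysLeft g (PySem.Set.add vis node) := by
                  unfold pvMu
                  rw [show List.contains (PySem.Set.add vis node) a = false from hcf]
                  simp
                omega
              rw [ih _ hmu a (PySem.Set.add vis node) (path ++ [node]) _ acc2 le_rfl]
              rw [ihl (acc2 ++ dfsA g a target (PySem.Set.add vis node) (path ++ [node]))]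
              rw [dfsAList_acc g tl target _ _
                ([] ++ dfsA g a target (PySem.Set.add vis node) (path ++ [node]))]
              simp [List.append_assoc]
        rw [key adjs acc]

-- ===== VERDICT (by name: the statement is the Claim_ definition above) =====
theorem dfs_r_paths_spec : Claim_equal_dfs_r_paths := by
  intro g root target visited path _ _
  unfold Spec_dfs_r_paths dfs_r_paths dfs_r_paths_alt
  rw [pvLoop_frame g target (pvMu g root (visited.getD [])) root (visited.getD [])
    (path.getD []) [] [] le_rfl]
  rw [pvStackLoop]
  simp
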